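-- pv_equiv track=rewrite | github.com/LucaBelmonteAmenta/EjemploCompilador | operators/AnalisisSintaxis.py | splitTree
-- ===== SOURCE A (Python) =====
-- def splitTree(arbol):
--
--     arbolDividido = []
--
--     cadena = ""
--
--     for caracter in arbol:
--
--         if (caracter == " ") or (caracter == ")"):
--             if (len(cadena) > 0):
--                 arbolDividido.append(cadena)
--             if (caracter == ")"):
--                 arbolDividido.append(caracter)
--             cadena = ""
--         elif (caracter != '\n'):
--             cadena = cadena + caracter
--
--     return arbolDividido
-- ===== SOURCE B (Python) =====
-- def splitTree(arbol):
--     s = arbol.replace('\n', '')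
--     pieces = s.split(')')
--     out = []
--     for piece in pieces[:-1]:
--         out += [t for t in piece.split(' ') if t]
--         out.append(')')
--     out += [t for t in pieces[-1].split(' ')[:-1] if t]
--     return out
-- ===== Notes on version B (the rewrite author's own statement) =====
-- stated objective: idiomatic
-- what changed: A builds tokens with a character-by-character accumulator loop; B strips newlines with str.replace, splits the whole string on the closing-parenthesis delimiter, splits each piece on single spaces, and drops the unterminated trailing token of the last piece.
import Mathlib
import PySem

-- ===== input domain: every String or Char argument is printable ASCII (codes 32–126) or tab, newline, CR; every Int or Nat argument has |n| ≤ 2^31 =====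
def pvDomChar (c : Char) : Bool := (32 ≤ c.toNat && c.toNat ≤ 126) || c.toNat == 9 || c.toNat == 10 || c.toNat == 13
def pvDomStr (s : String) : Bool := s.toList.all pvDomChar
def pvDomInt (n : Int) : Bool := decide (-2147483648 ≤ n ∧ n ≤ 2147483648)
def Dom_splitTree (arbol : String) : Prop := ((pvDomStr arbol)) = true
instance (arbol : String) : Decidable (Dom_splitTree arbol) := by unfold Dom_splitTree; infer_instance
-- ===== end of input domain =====

-- B replaces A's character-by-character accumulator scan by flat string splits
-- (strip newlines, split on the closing parenthesis, split each piece on spaces);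
-- objective: idiomatic (and measurably faster in CPython, where str.split runs in C).

-- ===== PORT A =====
-- A's loop state: (arbolDividido, cadena); tokens are kept as List Char and turned
-- into String only at the very end (String.ofList is the identity representation change).
def splitTreeStep (st : List (List Char) × List Char) (caracter : Char) :
    List (List Char) × List Char :=
  if caracter = ' ' ∨ caracter = ')' then
    let d1 := if st.2.length > 0 then st.1 ++ [st.2] else st.1
    let d2 := if caracter = ')' then d1 ++ [[caracter]] else d1
    (d2, [])
  else if caracter ≠ '\n' then (st.1, st.2 ++ [caracter])
  else st

def splitTree (arbol : String) : List String :=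
  ((arbol.toList.foldl splitTreeStep ([], [])).1).map String.ofList

-- ===== PORT B =====
def splitTree_alt (arbol : String) : List String :=
  let s := PySem.Chars.replace arbol.toList ['\n'] []          -- arbol.replace('\n','')
  let pieces := PySem.Chars.splitOn s [')']                     -- s.split(')')
  let out := (PySem.List.slice pieces none (some (-1))).foldl   -- for piece in pieces[:-1]
      (fun out piece =>
        (out ++ ((PySem.Chars.splitOn piece [' ']).filter
                   (fun t => decide (t ≠ []))).map String.ofList)   -- out += [t for t in piece.split(' ') if t]
          ++ [")"])                                             -- out.append(')')
      []
  out ++ ((PySem.List.slice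
            (PySem.Chars.splitOn ((PySem.List.pyGet? pieces (-1)).getD []) [' '])
            none (some (-1))).filter
          (fun t => decide (t ≠ []))).map String.ofList             -- out += [t for t in pieces[-1].split(' ')[:-1] if t]

-- ===== PRECONDITION & SPEC =====
def Spec_splitTree (arbol : String) (out : List String) : Prop := out = splitTree_alt arbol
instance (arbol : String) (out : List String) : Decidable (Spec_splitTree arbol out) := by unfold Spec_splitTree; infer_instance

-- ===== CLAIM (what is proved, stated in full; the proofs are below) =====
def Claim_equal_splitTree : Prop := ∀ (arbol : String), Dom_splitTree arbol → Spec_splitTree arbol (splitTree arbol)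

-- ===== LEMMAS AND PROOFS =====

-- simple split on a single character: pieces left to right, empty pieces kept
def ssplit (c : Char) : List Char → List (List Char)
  | [] => [[]]
  | x :: xs =>
    match ssplit c xs with
    | [] => []
    | p :: ps => if x = c then [] :: p :: ps else (x :: p) :: ps

theorem ssplit_ne_nil (c : Char) (l : List Char) : ssplit c l ≠ [] := by
  induction l with
  | nil => simp [ssplit]
  | cons x xs ih =>
    simp only [ssplit]
    rcases h : ssplit c xs with _ | ⟨p, ps⟩
    · exact absurd h ih
    · split_ifs <;> simp

theorem ssplit_cons_delim (c : Char) (l : List Char) :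
    ssplit c (c :: l) = [] :: ssplit c l := by
  rcases h : ssplit c l with _ | ⟨p, ps⟩
  · exact absurd h (ssplit_ne_nil c l)
  · simp [ssplit, h]

theorem ssplit_cons_free {c x : Char} (hx : x ≠ c) (l : List Char) :
    ssplit c (x :: l) = (x :: (ssplit c l).headI) :: (ssplit c l).tail := by
  rcases h : ssplit c l with _ | ⟨p, ps⟩
  · exact absurd h (ssplit_ne_nil c l)
  · simp [ssplit, h, hx]

theorem ssplit_append_free {c : Char} {u : List Char} (hu : ∀ x ∈ u, x ≠ c) (l : List Char) :
    ssplit c (u ++ l) = (u ++ (ssplit c l).headI) :: (ssplit c l).tail := by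
  induction u with
  | nil =>
    rcases h : ssplit c l with _ | ⟨p, ps⟩
    · exact absurd h (ssplit_ne_nil c l)
    · simp [h]
  | cons x xs ih =>
    have hx : x ≠ c := hu x (by simp)
    have ih' := ih (fun y hy => hu y (by simp [hy]))
    simp only [List.cons_append, ssplit_cons_free hx, ih']
    simp

theorem ssplit_free {c : Char} {u : List Char} (hu : ∀ x ∈ u, x ≠ c) :
    ssplit c u = [u] := by
  have := ssplit_append_free hu []
  simpa [ssplit] using this

theorem ssplit_append_delim {c : Char} {u : List Char} (hu : ∀ x ∈ u, x ≠ c) (l : List Char) :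
    ssplit c (u ++ c :: l) = u :: ssplit c l := by
  rw [ssplit_append_free hu, ssplit_cons_delim]
  simp

-- PySem.Chars.splitOn with a single-character separator is ssplit
theorem splitOn_go_eq (c : Char) :
    ∀ (fuel : Nat) (l cur : List Char) (acc : List (List Char)) (_ : l.length ≤ fuel),
      PySem.Chars.splitOn.go [c] fuel l cur acc
        = acc.reverse ++ (cur.reverse ++ (ssplit c l).headI) :: (ssplit c l).tail := by
  intro fuel
  induction fuel with
  | zero =>
    intro l cur acc h
    have : l = [] := List.length_eq_zero_iff.mp (Nat.le_zero.mp h)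
    subst this
    simp [PySem.Chars.splitOn.go, ssplit]
  | succ fuel ih =>
    intro l cur acc h
    cases l with
    | nil => simp [PySem.Chars.splitOn.go, ssplit]
    | cons x rest =>
      by_cases hx : x = c
      · subst hx
        have hpre : [x].isPrefixOf (x :: rest) = true := by simp [List.isPrefixOf]
        rw [PySem.Chars.splitOn.go.eq_def]
        simp only [hpre, if_true, List.length_cons, List.length_nil, List.drop_succ_cons,
          List.drop_zero]
        rw [ih rest [] (cur.reverse :: acc) (by simpa using Nat.le_of_succ_le_succ h)]
        rw [ssplit_cons_delim]
        rcases hs : ssplit x rest with _ | ⟨p, ps⟩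
        · exact absurd hs (ssplit_ne_nil x rest)
        · simp [hs]
      · have hpre : [c].isPrefixOf (x :: rest) = false := by
          simp [List.isPrefixOf]
          exact fun h' => absurd h'.symm hx
        rw [PySem.Chars.splitOn.go.eq_def]
        simp only [hpre]
        rw [if_neg (by simp [hpre])]
        rw [ih rest (x :: cur) acc (by simpa using Nat.le_of_succ_le_succ h)]
        rw [ssplit_cons_free hx]
        simp

theorem splitOn_single (c : Char) (l : List Char) :
    PySem.Chars.splitOn l [c] = ssplit c l := by
  rw [PySem.Chars.splitOn]
  rw [splitOn_go_eq c (l.length + 1) l [] [] (by omega)]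
  rcases h : ssplit c l with _ | ⟨p, ps⟩
  · exact absurd h (ssplit_ne_nil c l)
  · simp [h]

-- PySem.Chars.replace with old = ['\n'], new = [] is a filter
theorem replace_go_filter :
    ∀ (fuel : Nat) (l acc : List Char) (_ : l.length ≤ fuel),
      PySem.Chars.replace.go ['\n'] [] fuel l acc
        = acc.reverse ++ l.filter (fun x => decide (x ≠ '\n')) := by
  intro fuel
  induction fuel with
  | zero =>
    intro l acc h
    have : l = [] := List.length_eq_zero_iff.mp (Nat.le_zero.mp h)
    subst this
    simp [PySem.Chars.replace.go]
  | succ fuel ih =>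
    intro l acc h
    cases l with
    | nil => simp [PySem.Chars.replace.go]
    | cons x rest =>
      by_cases hx : x = '\n'
      · subst hx
        have hpre : ['\n'].isPrefixOf (('\n') :: rest) = true := by simp [List.isPrefixOf]
        rw [PySem.Chars.replace.go.eq_def]
        simp only [hpre, if_true, List.length_cons, List.length_nil, List.drop_succ_cons,
          List.drop_zero, List.reverse_nil, List.nil_append]
        rw [ih rest acc (by simpa using Nat.le_of_succ_le_succ h)]
        simp
      · have hpre : ['\n'].isPrefixOf (x :: rest) = false := by
          simp [List.isPrefixOf]
          exact fun h' => absurd h'.symm hx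
        rw [PySem.Chars.replace.go.eq_def]
        simp only [hpre]
        rw [if_neg (by simp [hpre])]
        rw [ih rest (x :: acc) (by simpa using Nat.le_of_succ_le_succ h)]
        simp [hx]

theorem replace_newline (l : List Char) :
    PySem.Chars.replace l ['\n'] [] = l.filter (fun x => decide (x ≠ '\n')) := by
  rw [PySem.Chars.replace]
  rw [if_neg (by simp)]
  exact replace_go_filter l.length l [] le_rfl

-- A's loop ignores '\n'
theorem foldA_filter (l : List Char) :
    ∀ st, l.foldl splitTreeStep st = (l.filter (fun x => decide (x ≠ '\n'))).foldl splitTreeStep st := by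
  induction l with
  | nil => intro st; rfl
  | cons x rest ih =>
    intro st
    by_cases hx : x = '\n'
    · subst hx
      have : splitTreeStep st '\n' = st := by simp [splitTreeStep]
      simp [this, ih]
    · simp [hx, List.foldl_cons, ih]

-- B at the character level
def bTokens (l : List Char) : List (List Char) :=
  let q := ssplit ')' l
  (q.dropLast.flatMap
     (fun piece => (ssplit ' ' piece).filter (fun t => decide (t ≠ [])) ++ [[')']]))
    ++ ((ssplit ' ' (q.getLastD [])).dropLast.filter (fun t => decide (t ≠ [])))

theorem bTokens_free {cur : List Char} (hcur : ∀ x ∈ cur, x ≠ ' ' ∧ x ≠ ')') :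
    bTokens cur = [] := by
  have h1 : ssplit ')' cur = [cur] := ssplit_free (fun x hx => (hcur x hx).2)
  have h2 : ssplit ' ' cur = [cur] := ssplit_free (fun x hx => (hcur x hx).1)
  simp [bTokens, h1, h2]

theorem bTokens_space {cur : List Char} (hcur : ∀ x ∈ cur, x ≠ ' ' ∧ x ≠ ')') (rest : List Char) :
    bTokens (cur ++ ' ' :: rest)
      = (if cur.length > 0 then [cur] else []) ++ bTokens rest := by
  rcases hq : ssplit ')' rest with _ | ⟨p, ps⟩
  · exact absurd hq (ssplit_ne_nil ')' rest)
  have hfree : ∀ x ∈ cur ++ [' '], x ≠ ')' := by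
    intro x hx
    rcases List.mem_append.mp hx with h | h
    · exact (hcur x h).2
    · simp at h; subst h; decide
  have hsp : ssplit ')' (cur ++ ' ' :: rest) = (cur ++ ' ' :: p) :: ps := by
    have := ssplit_append_free hfree rest
    rw [List.append_assoc] at this
    simpa [hq] using this
  have hssp : ssplit ' ' (cur ++ ' ' :: p) = cur :: ssplit ' ' p :=
    ssplit_append_delim (fun x hx => (hcur x hx).1) p
  rcases hp : ssplit ' ' p with _ | ⟨t, ts⟩
  · exact absurd hp (ssplit_ne_nil ' ' p)
  have hifcur : List.filter (fun t => decide (t ≠ [])) [cur]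
      = (if cur.length > 0 then [cur] else []) := by
    cases cur <;> simp [List.filter_cons]
  cases ps with
  | nil =>
    simp only [bTokens, hsp, hq, List.dropLast_singleton, List.flatMap_nil, List.nil_append,
      List.getLastD_cons, List.getLastD_nil, hssp, hp]
    rw [List.dropLast_cons_of_ne_nil (by simp)]
    cases cur <;> simp [List.filter_cons]
  | cons q qs =>
    simp only [bTokens, hsp, hq]
    rw [List.dropLast_cons_of_ne_nil (by simp), List.dropLast_cons_of_ne_nil (x := p) (by simp)]
    simp only [List.flatMap_cons, hssp, hp, List.getLastD_cons]
    cases cur <;> simp [List.filter_cons, List.append_assoc]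

theorem bTokens_rpar {cur : List Char} (hcur : ∀ x ∈ cur, x ≠ ' ' ∧ x ≠ ')') (rest : List Char) :
    bTokens (cur ++ ')' :: rest)
      = ((if cur.length > 0 then [cur] else []) ++ [[')']]) ++ bTokens rest := by
  rcases hq : ssplit ')' rest with _ | ⟨p, ps⟩
  · exact absurd hq (ssplit_ne_nil ')' rest)
  have hsp : ssplit ')' (cur ++ ')' :: rest) = cur :: p :: ps := by
    rw [ssplit_append_delim (fun x hx => (hcur x hx).2), hq]
  have h2 : ssplit ' ' cur = [cur] := ssplit_free (fun x hx => (hcur x hx).1)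
  simp only [bTokens, hsp, hq]
  rw [List.dropLast_cons_of_ne_nil (by simp)]
  simp only [List.flatMap_cons, h2, List.getLastD_cons]
  cases cur <;> simp [List.filter_cons, List.append_assoc]


-- main invariant: A's loop from state (acc, cur) produces acc ++ bTokens (cur ++ l)
theorem foldA_bTokens :
    ∀ (l : List Char) (acc : List (List Char)) (cur : List Char),
      (∀ x ∈ cur, x ≠ ' ' ∧ x ≠ ')') → '\n' ∉ l →
      (l.foldl splitTreeStep (acc, cur)).1 = acc ++ bTokens (cur ++ l) := by
  intro l
  induction l with
  | nil =>
    intro acc cur hcur _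
    simp [bTokens_free hcur]
  | cons c rest ih =>
    intro acc cur hcur hnl
    have hnl' : '\n' ∉ rest := fun h => hnl (by simp [h])
    by_cases hsp : c = ' '
    · subst hsp
      have hstep : splitTreeStep (acc, cur) ' '
          = (if cur.length > 0 then acc ++ [cur] else acc, []) := by
        simp [splitTreeStep]
      rw [List.foldl_cons, hstep, ih _ [] (by simp) hnl', bTokens_space hcur]
      split_ifs <;> simp
    · by_cases hrp : c = ')'
      · subst hrp
        have hstep : splitTreeStep (acc, cur) ')'
            = ((if cur.length > 0 then acc ++ [cur] else acc) ++ [[')']], []) := by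
          simp [splitTreeStep]
        rw [List.foldl_cons, hstep, ih _ [] (by simp) hnl', bTokens_rpar hcur]
        split_ifs <;> simp
      · have hcn : c ≠ '\n' := fun h => hnl (by simp [h])
        have hstep : splitTreeStep (acc, cur) c = (acc, cur ++ [c]) := by
          simp [splitTreeStep, hsp, hrp, hcn]
        have hcur' : ∀ x ∈ cur ++ [c], x ≠ ' ' ∧ x ≠ ')' := by
          intro x hx
          rcases List.mem_append.mp hx with h | h
          · exact hcur x h
          · simp at h; subst h; exact ⟨hsp, hrp⟩
        rw [List.foldl_cons, hstep, ih _ _ hcur' hnl']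
        simp

-- slice l[:-1] is dropLast
theorem slice_neg_one {α : Type} (l : List α) :
    PySem.List.slice l none (some (-1)) = l.dropLast := by
  cases l with
  | nil => rfl
  | cons x xs =>
    simp only [PySem.List.slice, PySem.List.clampIdx, List.dropLast_eq_take]
    rw [if_pos (by decide), if_neg (by simp)]
    simp only [List.drop_zero]
    congr 1
    omega

-- l[-1] with default is getLastD
theorem pyGet_neg_one_getLastD {α : Type} (l : List α) (hl : l ≠ []) (d : α) :
    (PySem.List.pyGet? l (-1)).getD d = l.getLastD d := by
  have hlen : 0 < l.length := List.length_pos_iff.mpr hl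
  simp only [PySem.List.pyGet?, PySem.List.pyIdx?]
  rw [if_neg (by omega), if_pos (by omega)]
  simp [List.getLastD_eq_getLast?, List.getLast?_eq_getElem?]

-- Source B's loop accumulates the map of the Chars-level flatMap
theorem foldB_flatMap :
    ∀ (q : List (List Char)) (init : List String),
      q.foldl (fun out piece =>
          (out ++ ((ssplit ' ' piece).filter (fun t => decide (t ≠ []))).map String.ofList) ++ [")"]) init
        = init ++ (q.flatMap
            (fun piece => (ssplit ' ' piece).filter (fun t => decide (t ≠ [])) ++ [[')']])).map String.ofList := by
  intro q
  induction q with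
  | nil => intro init; simp
  | cons p ps ih =>
    intro init
    rw [List.foldl_cons, ih, List.flatMap_cons]
    have hmk : String.ofList [')'] = ")" := by decide
    simp [hmk, List.append_assoc]

-- B's port computes bTokens of the newline-filtered character list
theorem splitTree_alt_eq (arbol : String) :
    splitTree_alt arbol
      = (bTokens (arbol.toList.filter (fun x => decide (x ≠ '\n')))).map String.ofList := by
  unfold splitTree_alt
  rw [replace_newline]
  have hq : PySem.Chars.splitOn (arbol.toList.filter (fun x => decide (x ≠ '\n'))) [')']
      = ssplit ')' (arbol.toList.filter (fun x => decide (x ≠ '\n'))) := splitOn_single _ _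
  simp only [hq, splitOn_single, slice_neg_one]
  rw [pyGet_neg_one_getLastD _ (ssplit_ne_nil _ _)]
  rw [foldB_flatMap]
  simp [bTokens]

theorem splitTree_eq (arbol : String) :
    splitTree arbol
      = (bTokens (arbol.toList.filter (fun x => decide (x ≠ '\n')))).map String.ofList := by
  rw [splitTree, foldA_filter]
  rw [foldA_bTokens _ [] [] (by simp) (by simp)]
  simp

-- ===== VERDICT (by name: the statement is the Claim_ definition above) =====
theorem splitTree_spec : Claim_equal_splitTree := by
  intro arbol _
  unfold Spec_splitTree
  rw [splitTree_eq, splitTree_alt_eq]
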